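-- pv_equiv track=rewrite | github.com/Hulyamr13/hackerrank | certificates/2.py | possibleChanges
-- ===== SOURCE A (Python) =====
-- def possibleChanges(usernames):
--     ans = []
--     i = 0
--     while i < len(usernames):
--         u = usernames[i]
--         if len(u) <= 1:
--             ans.append("NO")
--         else:
--             j = 0
--             while j < len(u) - 1:
--                 if u[j] > u[j + 1]:
--                     ans.append("YES")
--                     break
--                 j += 1
--             else:
--                 ans.append("NO")
--         i += 1
--     return ans
-- ===== SOURCE B (Python) =====
-- def possibleChanges(usernames):
--     return ["NO" if list(u) == sorted(u) else "YES" for u in usernames]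
-- ===== Notes on version B (the rewrite author's own statement) =====
-- stated objective: simpler
-- what changed: Replaces the index-based early-exit adjacent-pair scan (nested while loops with a for-else) by a one-line sort-and-compare per username: a string has a descending adjacent pair iff it differs from its sorted form.
import Mathlib
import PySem

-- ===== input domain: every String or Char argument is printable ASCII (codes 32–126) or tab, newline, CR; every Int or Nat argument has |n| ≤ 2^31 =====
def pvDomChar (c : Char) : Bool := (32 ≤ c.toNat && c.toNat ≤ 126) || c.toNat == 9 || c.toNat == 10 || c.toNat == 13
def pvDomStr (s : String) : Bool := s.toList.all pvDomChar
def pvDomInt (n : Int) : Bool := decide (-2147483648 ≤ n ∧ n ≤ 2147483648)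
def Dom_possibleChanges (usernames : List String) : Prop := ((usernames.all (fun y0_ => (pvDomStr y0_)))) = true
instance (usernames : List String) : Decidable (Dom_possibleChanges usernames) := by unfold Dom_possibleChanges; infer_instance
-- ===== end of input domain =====

-- B replaces A's index-based early-exit adjacent-descent scan with a per-username
-- sort-and-compare ("NO" iff the string equals its sorted form); objective: simpler.


-- ===== PORT A =====
-- inner `while j < len(u) - 1` loop of A (early exit on a descent, for-else appends "NO")
def pvLoopJ (cs : List Char) (j : Nat) : String :=
  if _h : j < cs.length - 1 then
    if cs.getD (j + 1) ' ' < cs.getD j ' ' then "YES"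
    else pvLoopJ cs (j + 1)
  else "NO"
termination_by cs.length - 1 - j

-- outer `while i < len(usernames)` loop of A, accumulating `ans`
def pvLoopI (usernames : List String) (i : Nat) (ans : List String) : List String :=
  if _h : i < usernames.length then
    let u := usernames.getD i ""
    pvLoopI usernames (i + 1)
      (ans ++ [if PySem.Str.len u ≤ 1 then "NO" else pvLoopJ u.toList 0])
  else ans
termination_by usernames.length - i

def possibleChanges (usernames : List String) : List String :=
  pvLoopI usernames 0 []

-- ===== PORT B =====
def possibleChanges_alt (usernames : List String) : List String :=
  usernames.map (fun u =>
    if u.toList = PySem.List.sorted u.toList (fun c => c) then "NO" else "YES")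

-- ===== PRECONDITION & SPEC =====
def Spec_possibleChanges (usernames : List String) (out : List String) : Prop := out = possibleChanges_alt usernames
instance (usernames : List String) (out : List String) : Decidable (Spec_possibleChanges usernames out) := by unfold Spec_possibleChanges; infer_instance

-- ===== CLAIM (what is proved, stated in full; the proofs are below) =====
def Claim_equal_possibleChanges : Prop := ∀ (usernames : List String), Dom_possibleChanges usernames → Spec_possibleChanges usernames (possibleChanges usernames)

-- ===== LEMMAS AND PROOFS =====

-- the inner scan returns "NO" iff every adjacent pair from index j on is non-descending
theorem pvLoopJ_eq_NO_iff (cs : List Char) (j : Nat) :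
    pvLoopJ cs j = "NO" ↔
      ∀ k, j ≤ k → k + 1 < cs.length → cs.getD k ' ' ≤ cs.getD (k + 1) ' ' := by
  fun_induction pvLoopJ cs j with
  | case1 j hj hdesc =>
    constructor
    · intro hcontr; exact absurd hcontr (by decide)
    · intro hall
      exact absurd (hall j le_rfl (by omega)) (not_le.mpr hdesc)
  | case2 j hj hdesc ih =>
    rw [ih]
    constructor
    · intro hall k hjk hk
      rcases Nat.eq_or_lt_of_le hjk with rfl | hlt'
      · exact not_lt.mp hdesc
      · exact hall k hlt' hk
    · intro hall k hjk hk; exact hall k (Nat.le_of_succ_le hjk) hk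
  | case3 j hj =>
    constructor
    · intro _ k hjk hk; exfalso; omega
    · intro _; rfl

theorem pvLoopJ_no_or_yes (cs : List Char) (j : Nat) :
    pvLoopJ cs j = "NO" ∨ pvLoopJ cs j = "YES" := by
  fun_induction pvLoopJ cs j with
  | case1 _ _ _ => right; rfl
  | case2 _ _ _ ih => exact ih
  | case3 _ _ => left; rfl

-- adjacent non-descent everywhere is the same as global Pairwise (≤)
theorem pairwise_iff_adj (cs : List Char) :
    cs.Pairwise (· ≤ ·) ↔
      ∀ k, 0 ≤ k → k + 1 < cs.length → cs.getD k ' ' ≤ cs.getD (k + 1) ' ' := by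
  rw [← List.isChain_iff_pairwise, List.isChain_iff_getElem]
  constructor
  · intro hch k _ hk
    rw [cs.getD_eq_getElem ' ' (by omega), cs.getD_eq_getElem ' ' hk]
    exact hch k hk
  · intro hadj i hi
    have := hadj i (Nat.zero_le _) hi
    rwa [cs.getD_eq_getElem ' ' (by omega), cs.getD_eq_getElem ' ' hi] at this

theorem sorted_eq_iff (cs : List Char) :
    cs = PySem.List.sorted cs (fun c => c) ↔ cs.Pairwise (· ≤ ·) := by
  constructor
  · intro h
    have := PySem.List.sorted_pairwise cs (fun c => c)
    rw [← h] at this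
    simpa using this
  · intro h
    exact (PySem.List.sorted_eq_self_of_pairwise cs (fun c => c) (by simpa using h)).symm

-- per-element agreement of the two bodies
theorem body_eq (u : String) :
    (if PySem.Str.len u ≤ 1 then "NO" else pvLoopJ u.toList 0) =
      (if u.toList = PySem.List.sorted u.toList (fun c => c) then "NO" else "YES") := by
  by_cases hp : u.toList.Pairwise (· ≤ ·)
  · rw [if_pos ((sorted_eq_iff u.toList).mpr hp)]
    by_cases hl : PySem.Str.len u ≤ 1
    · rw [if_pos hl]
    · rw [if_neg hl]
      exact (pvLoopJ_eq_NO_iff u.toList 0).mpr ((pairwise_iff_adj u.toList).mp hp)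
  · rw [if_neg (fun h => hp ((sorted_eq_iff u.toList).mp h))]
    have hlen : 1 < u.toList.length := by
      by_contra hle
      exact hp (by
        interval_cases h : u.toList.length
        · have h0 : u.toList = [] := List.length_eq_zero_iff.mp h
          rw [h0]; exact List.Pairwise.nil
        · obtain ⟨a, ha⟩ := List.length_eq_one_iff.mp h
          rw [ha]; simp)
    have hl : ¬ PySem.Str.len u ≤ 1 := by
      rw [PySem.Str.len_eq]; exact_mod_cast Nat.not_le.mpr hlen
    rw [if_neg hl]
    rcases pvLoopJ_no_or_yes u.toList 0 with hno | hyes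
    · exact absurd ((pairwise_iff_adj u.toList).mpr ((pvLoopJ_eq_NO_iff u.toList 0).mp hno)) hp
    · exact hyes

-- the outer loop is a map over the remaining suffix
theorem pvLoopI_eq (usernames : List String) (i : Nat) (ans : List String) :
    pvLoopI usernames i ans =
      ans ++ (usernames.drop i).map
        (fun u => if PySem.Str.len u ≤ 1 then "NO" else pvLoopJ u.toList 0) := by
  fun_induction pvLoopI usernames i ans with
  | case1 i ans h u ih =>
    simp only [dite_eq_ite] at ih
    rw [ih]
    have hdrop : usernames.drop i = usernames[i] :: usernames.drop (i + 1) :=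
      List.drop_eq_getElem_cons h
    rw [hdrop, List.map_cons, show u = usernames[i] from usernames.getD_eq_getElem "" h]
    simp
  | case2 i ans h =>
    rw [List.drop_of_length_le (by omega)]
    simp

-- ===== VERDICT (by name: the statement is the Claim_ definition above) =====
theorem possibleChanges_spec : Claim_equal_possibleChanges := by
  intro usernames _
  unfold Spec_possibleChanges possibleChanges possibleChanges_alt
  rw [pvLoopI_eq]
  simp only [List.nil_append, List.drop_zero]
  exact List.map_congr_left (fun u _ => body_eq u)
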